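-- pv_equiv track=rewrite | github.com/egorvts/Kattis | GuessingGame/right_solution.py | solution
-- ===== SOURCE A (Python) =====
-- def solution(game: list) -> str:
--     right = game[-1][0]
--
--     for i in range(len(game)-1):
--         guess = game[i][0]
--         response = game[i][1]
--         if response == "too high" and guess <= right:
--             return "Stan is dishonest"
--         elif response == "too low" and guess >= right:
--             return "Stan is dishonest"
--     return "Stan may be honest"
-- ===== SOURCE B (Python) =====
-- def solution(game: list) -> str:
--     right = game[-1][0]
--     lo = max((g for g, r in game[:-1] if r == "too low"), default=None)
--     hi = min((g for g, r in game[:-1] if r == "too high"), default=None)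
--     ok = (lo is None or lo < right) and (hi is None or hi > right)
--     return "Stan may be honest" if ok else "Stan is dishonest"
-- ===== Notes on version B (the rewrite author's own statement) =====
-- stated objective: alternative
-- what changed: Replaces the per-guess short-circuit consistency check with an aggregate decomposition: one pass collects max of 'too low' guesses and min of 'too high' guesses, then a single strict-interval test lo < right < hi decides honesty.
import Mathlib
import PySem

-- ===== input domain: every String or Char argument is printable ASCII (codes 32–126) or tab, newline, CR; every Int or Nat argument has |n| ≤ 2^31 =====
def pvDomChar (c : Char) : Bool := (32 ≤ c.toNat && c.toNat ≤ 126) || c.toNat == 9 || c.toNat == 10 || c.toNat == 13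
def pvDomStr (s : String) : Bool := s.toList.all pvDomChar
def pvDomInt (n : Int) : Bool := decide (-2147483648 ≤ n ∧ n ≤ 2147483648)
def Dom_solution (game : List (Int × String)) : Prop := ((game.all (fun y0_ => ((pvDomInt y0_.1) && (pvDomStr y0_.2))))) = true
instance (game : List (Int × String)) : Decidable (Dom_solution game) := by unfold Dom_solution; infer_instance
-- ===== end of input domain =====

-- B replaces A's per-guess short-circuit check with an aggregate decomposition:
-- max of the 'too low' guesses and min of the 'too high' guesses, then one strict interval test.
-- Both raise on the empty list (game[-1]); Pre_ excludes it.

-- ===== PORT A =====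
-- the for-loop over range(len(game)-1) indexing game[i], i.e. over the prefix game.dropLast, with early return
def solLoopA (right : Int) : List (Int × String) → String
  | [] => "Stan may be honest"
  | (g, r) :: rest =>
    if r = "too high" ∧ g ≤ right then "Stan is dishonest"
    else if r = "too low" ∧ g ≥ right then "Stan is dishonest"
    else solLoopA right rest

def solution (game : List (Int × String)) : String :=
  match PySem.List.pyGet? game (-1) with   -- game[-1]; none = IndexError, excluded by Pre_
  | none => ""
  | some last => solLoopA last.1 game.dropLast

-- ===== PORT B =====
def solution_alt (game : List (Int × String)) : String :=
  match PySem.List.pyGet? game (-1) with   -- game[-1]; none = IndexError, excluded by Pre_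
  | none => ""
  | some last =>
    let right := last.1
    let body := PySem.List.slice game none (some (-1))   -- game[:-1]
    let lo := PySem.List.max? ((body.filter (fun q => q.2 = "too low")).map Prod.fst) (fun x => x)
    let hi := PySem.List.min? ((body.filter (fun q => q.2 = "too high")).map Prod.fst) (fun x => x)
    let ok := (match lo with | none => true | some m => decide (m < right))
           && (match hi with | none => true | some m => decide (right < m))
    if ok then "Stan may be honest" else "Stan is dishonest"

-- ===== PRECONDITION & SPEC =====
-- A raises IndexError on the empty list (game[-1]); B raises there too.
def Pre_solution (game : List (Int × String)) : Prop := game ≠ []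
instance (game : List (Int × String)) : Decidable (Pre_solution game) := by unfold Pre_solution; infer_instance
def pvWitness_solution : (List (Int × String)) := [(3, "too low"), (5, "correct")]

def Spec_solution (game : List (Int × String)) (out : String) : Prop := out = solution_alt game
instance (game : List (Int × String)) (out : String) : Decidable (Spec_solution game out) := by unfold Spec_solution; infer_instance

-- ===== CLAIM (what is proved, stated in full; the proofs are below) =====
def Claim_equal_solution : Prop := ∀ (game : List (Int × String)), Dom_solution game → Pre_solution game → Spec_solution game (solution game)

-- ===== LEMMAS AND PROOFS =====

-- A's loop returns "Stan is dishonest" iff some prefix element contradicts the final answer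
theorem solLoopA_eq_any (right : Int) (l : List (Int × String)) :
    solLoopA right l =
      if l.any (fun q => (decide (q.2 = "too high") && decide (q.1 ≤ right)) || (decide (q.2 = "too low") && decide (right ≤ q.1)))
      then "Stan is dishonest" else "Stan may be honest" := by
  induction l with
  | nil => simp [solLoopA]
  | cons hd tl ih =>
    obtain ⟨g, r⟩ := hd
    by_cases hA : r = "too high" ∧ g ≤ right
    · simp [solLoopA, hA.1, hA.2]
    · by_cases hB : r = "too low" ∧ right ≤ g
      · rw [solLoopA, if_neg hA, if_pos ⟨hB.1, hB.2⟩]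
        simp [hB.1, hB.2]
      · have hhead : ((decide (r = "too high") && decide (g ≤ right)) ||
            (decide (r = "too low") && decide (right ≤ g))) = false := by
          simp only [Bool.or_eq_false_iff, Bool.and_eq_false_iff, decide_eq_false_iff_not]
          constructor <;> tauto
        rw [solLoopA, if_neg hA, if_neg (fun h => hB ⟨h.1, h.2⟩), ih]
        simp only [List.any_cons]
        simp only [hhead, Bool.false_or]

-- the strict "below right" test on the running max equals "no element ≥ right"
theorem maxCond (xs : List Int) (r : Int) :
    (match PySem.List.max? xs (fun x => x) with | none => true | some m => decide (m < r))
      = !(xs.any (fun y => decide (r ≤ y))) := by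
  cases xs with
  | nil => simp [PySem.List.max?]
  | cons x t =>
    rw [PySem.List.max?_id_cons]
    have hle := PySem.List.le_foldl_max t x
    have hmem := PySem.List.foldl_max_mem t x
    by_cases h : t.foldl max x < r
    · have hno : (x :: t).any (fun y => decide (r ≤ y)) = false := by
        rw [Bool.eq_false_iff]
        intro hc
        rw [List.any_eq_true] at hc
        obtain ⟨y, hy, hry⟩ := hc
        rw [decide_eq_true_eq] at hry
        rcases List.mem_cons.mp hy with rfl | hyt
        · exact absurd (lt_of_le_of_lt hle.1 h) (not_lt.mpr hry)
        · exact absurd (lt_of_le_of_lt (hle.2 y hyt) h) (not_lt.mpr hry)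
      rw [hno]
      simpa using h
    · have hyes : (x :: t).any (fun y => decide (r ≤ y)) = true := by
        rw [List.any_eq_true]
        rcases hmem with he | hm
        · exact ⟨x, List.mem_cons_self, by rw [decide_eq_true_eq, ← he]; exact not_lt.mp h⟩
        · exact ⟨_, List.mem_cons_of_mem x hm, by rw [decide_eq_true_eq]; exact not_lt.mp h⟩
      rw [hyes]
      simpa using h
  
-- the strict "above right" test on the running min equals "no element ≤ right"
theorem minCond (xs : List Int) (r : Int) :
    (match PySem.List.min? xs (fun x => x) with | none => true | some m => decide (r < m))
      = !(xs.any (fun y => decide (y ≤ r))) := by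
  cases xs with
  | nil => simp [PySem.List.min?]
  | cons x t =>
    rw [PySem.List.min?_id_cons]
    have hle := PySem.List.foldl_min_le t x
    have hmem := PySem.List.foldl_min_mem t x
    by_cases h : r < t.foldl min x
    · have hno : (x :: t).any (fun y => decide (y ≤ r)) = false := by
        rw [Bool.eq_false_iff]
        intro hc
        rw [List.any_eq_true] at hc
        obtain ⟨y, hy, hry⟩ := hc
        rw [decide_eq_true_eq] at hry
        rcases List.mem_cons.mp hy with rfl | hyt
        · exact absurd (lt_of_lt_of_le h hle.1) (not_lt.mpr hry)
        · exact absurd (lt_of_lt_of_le h (hle.2 y hyt)) (not_lt.mpr hry)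
      rw [hno]
      simpa using h
    · have hyes : (x :: t).any (fun y => decide (y ≤ r)) = true := by
        rw [List.any_eq_true]
        rcases hmem with he | hm
        · exact ⟨x, List.mem_cons_self, by rw [decide_eq_true_eq, ← he]; exact not_lt.mp h⟩
        · exact ⟨_, List.mem_cons_of_mem x hm, by rw [decide_eq_true_eq]; exact not_lt.mp h⟩
      rw [hyes]
      simpa using h

-- ===== VERDICT (by name: the statement is the Claim_ definition above) =====
theorem solution_spec : Claim_equal_solution := by
  intro game _ hpre
  unfold Spec_solution solution solution_alt
  cases hget : PySem.List.pyGet? game (-1) with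
  | none =>
    exfalso
    rw [PySem.List.pyGet?_neg_one] at hget
    exact hpre (List.getLast?_eq_none_iff.mp hget)
  | some last =>
    simp only [PySem.List.slice_to_neg_one]
    rw [solLoopA_eq_any last.1 game.dropLast, maxCond, minCond]
    have E : (((game.dropLast.filter (fun q => q.2 = "too low")).map Prod.fst).any
          (fun y => decide (last.1 ≤ y)) ||
        ((game.dropLast.filter (fun q => q.2 = "too high")).map Prod.fst).any
          (fun y => decide (y ≤ last.1)))
        = game.dropLast.any (fun q => (decide (q.2 = "too high") && decide (q.1 ≤ last.1)) ||
            (decide (q.2 = "too low") && decide (last.1 ≤ q.1))) := by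
      simp only [List.any_map, List.any_filter, Function.comp]
      rw [Bool.eq_iff_iff]
      simp only [Bool.or_eq_true, List.any_eq_true, Bool.and_eq_true, decide_eq_true_eq]
      constructor
      · rintro (⟨q, hq, h1, h2⟩ | ⟨q, hq, h1, h2⟩)
        · exact ⟨q, hq, Or.inr ⟨h1, h2⟩⟩
        · exact ⟨q, hq, Or.inl ⟨h1, h2⟩⟩
      · rintro ⟨q, hq, ⟨h1, h2⟩ | ⟨h1, h2⟩⟩
        · exact Or.inr ⟨q, hq, h1, h2⟩
        · exact Or.inl ⟨q, hq, h1, h2⟩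
    simp only [← Bool.not_or, E]
    cases hP : game.dropLast.any (fun q => (decide (q.2 = "too high") && decide (q.1 ≤ last.1)) ||
        (decide (q.2 = "too low") && decide (last.1 ≤ q.1))) <;> simp
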